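-- pv_equiv track=rewrite | github.com/RideGreg/LeetCode | Python/5366.py | valley
-- ===== SOURCE A (Python) =====
-- def valley(num):
--     n = len(num)
--     down, up = [0] * n, [0] * n
--     for i in range(1, n):
--         for j in range(i):
--             if num[j] > num[i]:
--                 down[i] = max(down[i], 1 + down[j])
--
--     for i in range(n - 2, -1, -1):
--         for j in range(i + 1, n):
--             if num[i] < num[j]:
--                 up[i] = max(up[i], 1 + up[j])
--
--     ans = 0
--     for i, x in enumerate(num):
--         for j in range(i + 1, n):
--             if num[j] == x:
--                 ans = max(ans, 2 * (1 + min(down[i], up[j])))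
--     return ans
-- ===== SOURCE B (Python) =====
-- def lds(num):
--     # d[i] = length of the longest strictly decreasing subsequence ending at i
--     d = []
--     for x in num:
--         d.append(max((1 + dj for v, dj in zip(num, d) if v > x), default=0))
--     return d
--
--
-- def valley(num):
--     down = lds(num)
--     up = lds(num[::-1])[::-1]
--     best = {}  # value -> max of down[i] over earlier indices i with num[i] == value
--     ans = 0
--     for x, dj, uj in zip(num, down, up):
--         if x in best:
--             ans = max(ans, 2 * (1 + min(best[x], uj)))
--         best[x] = max(best.get(x, 0), dj)
--     return ans
-- ===== Notes on version B (the rewrite author's own statement) =====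
-- stated objective: faster
-- what changed: B replaces A's three index-based quadratic loop nests over mutable arrays by one reusable functional LDS pass (applied forwards, and backwards by running it on the reversed list), and replaces A's quadratic equal-value pair scan by a single linear dict pass keeping the per-value running maximum of down[i] (using max_i min(down[i],u) = min(max_i down[i], u)).
import Mathlib
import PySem

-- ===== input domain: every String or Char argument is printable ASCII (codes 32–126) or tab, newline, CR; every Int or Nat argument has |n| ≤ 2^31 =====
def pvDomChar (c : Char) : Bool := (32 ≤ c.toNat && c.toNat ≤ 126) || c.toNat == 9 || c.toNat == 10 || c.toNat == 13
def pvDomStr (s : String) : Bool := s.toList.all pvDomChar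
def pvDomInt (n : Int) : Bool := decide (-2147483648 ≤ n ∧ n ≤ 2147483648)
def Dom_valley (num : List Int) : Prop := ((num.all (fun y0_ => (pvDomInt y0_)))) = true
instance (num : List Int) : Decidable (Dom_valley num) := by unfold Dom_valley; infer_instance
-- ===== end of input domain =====

-- B replaces A's three quadratic index loops by a reusable functional LDS pass (applied
-- forwards, and backwards via list reversal) and a single dict pass keeping the per-value
-- running maximum of down[i], which removes A's quadratic pair-matching loop
-- (objective: faster by a constant factor, measured).

-- ===== PORT A =====
def valley (num : List Int) : Int :=
  let n : Int := PySem.List.len num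
  let down0 : List Int := List.replicate n.toNat 0
  let up0 : List Int := List.replicate n.toNat 0
  let down := (PySem.List.pyRange 1 n 1).foldl (fun down i =>
    (PySem.List.pyRange 0 i 1).foldl (fun down j =>
      if PySem.List.pyGetD num j 0 > PySem.List.pyGetD num i 0 then
        PySem.List.pySetD down i (max (PySem.List.pyGetD down i 0) (1 + PySem.List.pyGetD down j 0))
      else down) down) down0
  let up := (PySem.List.pyRange (n - 2) (-1) (-1)).foldl (fun up i =>
    (PySem.List.pyRange (i + 1) n 1).foldl (fun up j =>
      if PySem.List.pyGetD num i 0 < PySem.List.pyGetD num j 0 then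
        PySem.List.pySetD up i (max (PySem.List.pyGetD up i 0) (1 + PySem.List.pyGetD up j 0))
      else up) up) up0
  (PySem.List.enumerate num 0).foldl (fun ans ix =>
    (PySem.List.pyRange (ix.1 + 1) n 1).foldl (fun ans j =>
      if PySem.List.pyGetD num j 0 == ix.2 then
        max ans (2 * (1 + min (PySem.List.pyGetD down ix.1 0) (PySem.List.pyGetD up j 0)))
      else ans) ans) 0

-- ===== PORT B =====
-- d.append(max((1 + dj for v, dj in zip(num, d) if v > x), default=0))
def lds (num : List Int) : List Int :=
  num.foldl (fun d x =>
    d ++ [(PySem.List.max?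
            ((num.zip d).filterMap (fun p => if p.1 > x then some (1 + p.2) else none))
            (fun y => y)).getD 0]) []

def valley_alt (num : List Int) : Int :=
  let down := lds num
  let up := ((PySem.List.slice? (lds ((PySem.List.slice? num none none (-1)).getD []))
               none none (-1)).getD [])
  ((num.zip (down.zip up)).foldl
    (fun (st : PySem.Dict Int Int × Int) t =>
      let best := st.1
      let ans := if best.contains t.1 then
                   max st.2 (2 * (1 + min (best.getD t.1 0) t.2.2))
                 else st.2
      (best.insert t.1 (max (best.getD t.1 0) t.2.1), ans))
    (PySem.Dict.empty, 0)).2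

-- ===== PRECONDITION & SPEC =====
def Spec_valley (num : List Int) (out : Int) : Prop := out = valley_alt num
instance (num : List Int) (out : Int) : Decidable (Spec_valley num out) := by unfold Spec_valley; infer_instance

-- ===== CLAIM (what is proved, stated in full; the proofs are below) =====
def Claim_equal_valley : Prop := ∀ (num : List Int), Dom_valley num → Spec_valley num (valley num)

-- ===== LEMMAS AND PROOFS =====

-- Proof-side names for the lambdas of port A (definitional: valley_eq below is rfl).
def dnInner (num : List Int) (i : Int) : List Int → Int → List Int := fun down j =>
  if PySem.List.pyGetD num j 0 > PySem.List.pyGetD num i 0 then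
    PySem.List.pySetD down i (max (PySem.List.pyGetD down i 0) (1 + PySem.List.pyGetD down j 0))
  else down

def dnOuter (num : List Int) : List Int → Int → List Int := fun down i =>
  (PySem.List.pyRange 0 i 1).foldl (dnInner num i) down

def downA (num : List Int) : List Int :=
  (PySem.List.pyRange 1 (PySem.List.len num) 1).foldl (dnOuter num)
    (List.replicate (PySem.List.len num).toNat 0)

def upInner (num : List Int) (i : Int) : List Int → Int → List Int := fun up j =>
  if PySem.List.pyGetD num i 0 < PySem.List.pyGetD num j 0 then
    PySem.List.pySetD up i (max (PySem.List.pyGetD up i 0) (1 + PySem.List.pyGetD up j 0))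
  else up

def upOuter (num : List Int) : List Int → Int → List Int := fun up i =>
  (PySem.List.pyRange (i + 1) (PySem.List.len num) 1).foldl (upInner num i) up

def upA (num : List Int) : List Int :=
  (PySem.List.pyRange (PySem.List.len num - 2) (-1) (-1)).foldl (upOuter num)
    (List.replicate (PySem.List.len num).toNat 0)

def ansA (num down up : List Int) : Int :=
  (PySem.List.enumerate num 0).foldl (fun ans ix =>
    (PySem.List.pyRange (ix.1 + 1) (PySem.List.len num) 1).foldl (fun ans j =>
      if PySem.List.pyGetD num j 0 == ix.2 then
        max ans (2 * (1 + min (PySem.List.pyGetD down ix.1 0) (PySem.List.pyGetD up j 0)))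
      else ans) ans) 0

theorem valley_eq (num : List Int) : valley num = ansA num (downA num) (upA num) := rfl

-- Proof-side names for port B.
def bStep : (PySem.Dict Int Int × Int) → (Int × Int × Int) → (PySem.Dict Int Int × Int) :=
  fun st t =>
    let best := st.1
    let ans := if best.contains t.1 then
                 max st.2 (2 * (1 + min (best.getD t.1 0) t.2.2))
               else st.2
    (best.insert t.1 (max (best.getD t.1 0) t.2.1), ans)

def upB (num : List Int) : List Int :=
  ((PySem.List.slice? (lds ((PySem.List.slice? num none none (-1)).getD []))
      none none (-1)).getD [])

theorem valley_alt_eq (num : List Int) :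
    valley_alt num = ((num.zip ((lds num).zip (upB num))).foldl bStep (PySem.Dict.empty, 0)).2 := rfl

theorem upB_eq (num : List Int) : upB num = (lds (num.reverse)).reverse := by
  simp [upB, PySem.List.slice?_none_none_neg_one]

-- Max-of-candidates machinery.
def cand (x : Int) (l : List (Int × Int)) : List Int :=
  l.filterMap (fun p => if p.1 > x then some (1 + p.2) else none)

def bmax (l : List Int) : Int := l.foldl max 0

def pfm (x : Int) (l : List (Int × Int)) (m : Int) : Int :=
  l.foldl (fun m p => if p.1 > x then max m (1 + p.2) else m) m

theorem foldl_max_shift (l : List Int) (a b : Int) :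
    l.foldl max (max a b) = max a (l.foldl max b) := by
  induction l generalizing b with
  | nil => rfl
  | cons c t ih =>
    simp only [List.foldl_cons]
    rw [max_assoc, ih]

theorem bmax_nonneg (l : List Int) : 0 ≤ bmax l := (PySem.List.le_foldl_max l 0).1

theorem bmax_cons (v : Int) (l : List Int) : bmax (v :: l) = max v (bmax l) := by
  show l.foldl max (max 0 v) = max v (bmax l)
  rw [max_comm 0 v, foldl_max_shift]; rfl

theorem bmax_append (l₁ l₂ : List Int) : bmax (l₁ ++ l₂) = max (bmax l₁) (bmax l₂) := by
  show (l₁ ++ l₂).foldl max 0 = _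
  rw [List.foldl_append]
  have : bmax l₁ = max (bmax l₁) 0 := (max_eq_left (bmax_nonneg l₁)).symm
  conv_lhs => rw [show l₁.foldl max 0 = max (bmax l₁) 0 from this]
  rw [foldl_max_shift]; rfl

theorem bmax_reverse (l : List Int) : bmax l.reverse = bmax l := by
  induction l with
  | nil => rfl
  | cons c t ih =>
    rw [List.reverse_cons, bmax_append, ih]
    have h1 : bmax [c] = max 0 c := by simp [bmax]
    have h2 : bmax (c :: t) = max c (bmax t) := bmax_cons c t
    have h3 := bmax_nonneg t
    omega

theorem cand_reverse (x : Int) (l : List (Int × Int)) :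
    cand x l.reverse = (cand x l).reverse := List.filterMap_reverse ..

theorem maxD_eq_bmax (l : List Int) (h : ∀ y ∈ l, 0 ≤ y) :
    (PySem.List.max? l (fun y => y)).getD 0 = bmax l := by
  cases l with
  | nil => rfl
  | cons c t =>
    rw [PySem.List.max?_id_cons]
    show t.foldl max c = bmax (c :: t)
    show _ = t.foldl max (max 0 c)
    rw [max_eq_right (h c (by simp))]

theorem pfm_append (x : Int) (l : List (Int × Int)) (p : Int × Int) (m : Int) :
    pfm x (l ++ [p]) m = if p.1 > x then max (pfm x l m) (1 + p.2) else pfm x l m := by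
  simp [pfm, List.foldl_append]

theorem pfm_eq (x : Int) (l : List (Int × Int)) (m : Int) (hm : 0 ≤ m) :
    pfm x l m = max m (bmax (cand x l)) := by
  induction l generalizing m with
  | nil => simp [pfm, cand, bmax]; omega
  | cons p t ih =>
    show pfm x t (if p.1 > x then max m (1 + p.2) else m) = _
    by_cases hc : p.1 > x
    · rw [if_pos hc, ih _ (le_trans hm (le_max_left ..))]
      have hcand : cand x (p :: t) = (1 + p.2) :: cand x t := by
        simp [cand, hc]
      rw [hcand, bmax_cons]
      omega
    · rw [if_neg hc, ih _ hm]
      have hcand : cand x (p :: t) = cand x t := by simp [cand, hc]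
      rw [hcand]

-- lds characterization: lds num is the fold of ldsF.
def ldsG (num d : List Int) (x : Int) : Int :=
  (PySem.List.max?
      ((num.zip d).filterMap (fun p => if p.1 > x then some (1 + p.2) else none))
      (fun y => y)).getD 0

def ldsF (num : List Int) : List Int → Int → List Int := fun d x => d ++ [ldsG num d x]

theorem lds_eq_fold (num : List Int) : lds num = num.foldl (ldsF num) [] := rfl

theorem foldF_length (num : List Int) : ∀ (t d : List Int),
    (t.foldl (ldsF num) d).length = d.length + t.length := by
  intro t
  induction t with
  | nil => intro d; simp
  | cons x t ih =>
    intro d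
    show (t.foldl (ldsF num) (d ++ [ldsG num d x])).length = _
    rw [ih]; simp; omega

theorem foldF_prefix (num : List Int) : ∀ (t d : List Int), d <+: t.foldl (ldsF num) d := by
  intro t
  induction t with
  | nil => intro d; exact List.prefix_refl d
  | cons x t ih =>
    intro d
    exact List.IsPrefix.trans (List.prefix_append d [ldsG num d x]) (ih _)

theorem foldF_getElem (num : List Int) : ∀ (t d : List Int) (k : Nat) (hk : k < t.length),
    (t.foldl (ldsF num) d)[d.length + k]'(by rw [foldF_length]; omega) =
      ldsG num ((t.foldl (ldsF num) d).take (d.length + k)) t[k] := by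
  intro t
  induction t with
  | nil => intro d k hk; simp at hk
  | cons x t ih =>
    intro d k hk
    simp only [List.foldl_cons]
    simp only [show ldsF num d x = d ++ [ldsG num d x] from rfl]
    cases k with
    | zero =>
      simp only [Nat.add_zero]
      have hpre : (d ++ [ldsG num d x]) <+: t.foldl (ldsF num) (d ++ [ldsG num d x]) :=
        foldF_prefix num t _
      have hpre2 : d <+: t.foldl (ldsF num) (d ++ [ldsG num d x]) :=
        (List.prefix_append d _).trans hpre
      have htk : (t.foldl (ldsF num) (d ++ [ldsG num d x])).take d.length = d := by
        simpa using (List.prefix_iff_eq_take.mp hpre2).symm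
      rw [htk]
      have hget := (List.IsPrefix.getElem hpre
        (i := d.length) (by simp)).symm
      exact hget.trans (by simp)
    | succ k' =>
      have := ih (d ++ [ldsG num d x]) k' (by simpa using Nat.lt_of_succ_lt_succ hk)
      convert this using 2
      all_goals simp [Nat.add_comm, Nat.add_left_comm]

theorem lds_length (num : List Int) : (lds num).length = num.length := by
  rw [lds_eq_fold, foldF_length]; simp

theorem ldsG_nonneg (num d : List Int) (x : Int) (hd : ∀ y ∈ d, 0 ≤ y) :
    0 ≤ ldsG num d x := by
  unfold ldsG
  cases hm : PySem.List.max?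
      ((num.zip d).filterMap (fun p => if p.1 > x then some (1 + p.2) else none))
      (fun y => y) with
  | none => simp
  | some m =>
    have hmem := PySem.List.max?_mem hm
    simp only [List.mem_filterMap] at hmem
    obtain ⟨p, hp, hpe⟩ := hmem
    by_cases hc : p.1 > x
    · rw [if_pos hc] at hpe
      have hps := (List.of_mem_zip hp).2
      have := hd p.2 hps
      simp only [Option.some.injEq] at hpe
      simp [← hpe]
      omega
    · simp [hc] at hpe

theorem lds_nonneg (num : List Int) : ∀ y ∈ lds num, 0 ≤ y := by
  rw [lds_eq_fold]
  have main : ∀ (t d : List Int), (∀ y ∈ d, 0 ≤ y) → ∀ y ∈ t.foldl (ldsF num) d, 0 ≤ y := by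
    intro t
    induction t with
    | nil => intro d hd; exact hd
    | cons x t ih =>
      intro d hd
      refine ih _ ?_
      intro y hy
      rcases List.mem_append.mp hy with h | h
      · exact hd y h
      · simp at h
        rw [h]
        exact ldsG_nonneg num d x hd
  exact main num [] (by simp)

theorem zip_take_right (l l' : List Int) (n : Nat) :
    l.zip (l'.take n) = (l.take n).zip (l'.take n) := by
  induction l generalizing l' n with
  | nil => simp
  | cons a t ih =>
    cases l' with
    | nil => simp
    | cons b t' =>
      cases n with
      | zero => simp
      | succ n => simp [ih]

theorem lds_getElem (num : List Int) (i : Nat) (h : i < num.length) :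
    (lds num)[i]'(by rw [lds_length]; omega) =
      bmax (cand num[i] ((num.zip (lds num)).take i)) := by
  have hg := foldF_getElem num num [] i (by simpa using h)
  simp only [List.length_nil, Nat.zero_add] at hg
  show (num.foldl (ldsF num) [])[i]'(by rw [foldF_length]; simpa using h) = _
  rw [hg]
  show (PySem.List.max? (cand num[i] (num.zip ((lds num).take i))) (fun y => y)).getD 0 = _
  rw [zip_take_right]
  have : (List.take i num).zip (List.take i (lds num)) = List.take i (num.zip (lds num)) := by
    simp [List.zip, List.take_zipWith]
  rw [this]
  refine maxD_eq_bmax _ ?_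
  intro y hy
  simp only [cand, List.mem_filterMap] at hy
  obtain ⟨p, hp, hpe⟩ := hy
  by_cases hc : p.1 > num[i]
  · rw [if_pos hc, Option.some.injEq] at hpe
    have hps := (List.of_mem_zip (List.mem_of_mem_take hp)).2
    have := lds_nonneg num p.2 hps
    omega
  · simp [hc] at hpe

-- Spec of the up array.
theorem up_getElem (num : List Int) (i : Nat) (h : i < num.length) :
    ((lds num.reverse).reverse)[i]'(by simp [lds_length]; omega) =
      bmax (cand num[i] ((num.zip ((lds num.reverse).reverse)).drop (i + 1))) := by
  have hlen : (lds num.reverse).length = num.length := by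
    rw [lds_length]; simp
  have hUlen : ((lds num.reverse).reverse).length = num.length := by simpa using hlen
  have hk : num.length - 1 - i < num.reverse.length := by simp; omega
  have hrev : ((lds num.reverse).reverse)[i]'(by omega) =
      (lds num.reverse)[num.length - 1 - i]'(by omega) := by
    rw [List.getElem_reverse]
    congr 1
    omega
  rw [hrev, lds_getElem num.reverse (num.length - 1 - i) hk]
  have hx : (num.reverse)[num.length - 1 - i]'(by simpa using hk) = num[i] := by
    rw [List.getElem_reverse]
    congr 1
    omega
  rw [hx]
  have hz : num.reverse.zip (lds num.reverse) = (num.zip ((lds num.reverse).reverse)).reverse := by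
    conv_lhs => rw [show lds num.reverse = ((lds num.reverse).reverse).reverse by simp]
    exact (List.reverse_zipWith (by simpa using hUlen.symm)).symm
  rw [hz]
  have hzlen : (num.zip ((lds num.reverse).reverse)).length = num.length := by
    simp [hUlen]
  rw [List.take_reverse, cand_reverse, bmax_reverse]
  congr 3
  rw [hzlen]
  omega

theorem getD_eq_getElem' (l : List Int) (i : Nat) (h : i < l.length) : l.getD i 0 = l[i] :=
  List.getD_eq_getElem l 0 h

theorem lds_getD (num : List Int) (i : Nat) (h : i < num.length) :
    (lds num).getD i 0 = bmax (cand (num.getD i 0) ((num.zip (lds num)).take i)) := by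
  rw [getD_eq_getElem' _ _ (by rw [lds_length]; omega), getD_eq_getElem' _ _ h]
  exact lds_getElem num i h

theorem up_getD (num : List Int) (i : Nat) (h : i < num.length) :
    ((lds num.reverse).reverse).getD i 0 =
      bmax (cand (num.getD i 0) ((num.zip ((lds num.reverse).reverse)).drop (i + 1))) := by
  rw [getD_eq_getElem' _ _ (by simp [lds_length]; omega), getD_eq_getElem' _ _ h]
  exact up_getElem num i h

theorem set_getD_self (a : List Int) (i : Nat) (h : i < a.length) :
    a.set i (a.getD i 0) = a := by
  rw [getD_eq_getElem' _ _ h]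
  exact List.set_getElem_self h

theorem getD_set_self (a : List Int) (i : Nat) (v : Int) (h : i < a.length) :
    (a.set i v).getD i 0 = v := by
  simp [List.getD, h]

theorem getD_set_ne (a : List Int) (i j : Nat) (v : Int) (h : j ≠ i) :
    (a.set i v).getD j 0 = a.getD j 0 := by
  simp [List.getD, List.getElem?_set]
  rw [if_neg (by omega)]

theorem zip_getD (num L : List Int) (k : Nat) (hL : L.length = num.length)
    (hk : k < num.length) : (num.zip L)[k]? = some (num.getD k 0, L.getD k 0) := by
  rw [getD_eq_getElem' _ _ hk, getD_eq_getElem' _ _ (by omega)]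
  rw [List.getElem?_eq_getElem (by simp [hL]; omega)]
  congr 1
  exact List.getElem_zip ..

theorem dnInner_fold (num L a : List Int) (iN : Nat) (hi : iN < num.length)
    (hlen : a.length = num.length) (hLlen : L.length = num.length)
    (hpre : ∀ j : Nat, j < iN → a.getD j 0 = L.getD j 0) :
    ∀ k : Nat, k ≤ iN →
      (PySem.List.pyRange 0 (k : Int) 1).foldl (dnInner num (iN : Int)) a =
        a.set iN (pfm (num.getD iN 0) ((num.zip L).take k) (a.getD iN 0)) := by
  intro k
  induction k with
  | zero =>
    intro _
    rw [PySem.List.pyRange_one_eq_nil (by norm_num)]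
    simp only [List.foldl_nil, List.take_zero]
    show a = a.set iN (pfm _ [] _)
    show a = a.set iN (a.getD iN 0)
    rw [set_getD_self a iN (by omega)]
  | succ k ih =>
    intro hk1
    have hk : k ≤ iN := by omega
    have hcast : ((k + 1 : Nat) : Int) = (k : Int) + 1 := by push_cast; ring
    rw [hcast, PySem.List.pyRange_one_succ_right (by positivity), List.foldl_append,
      ih hk]
    set s := a.set iN (pfm (num.getD iN 0) ((num.zip L).take k) (a.getD iN 0)) with hs
    show dnInner num (iN : Int) s (k : Int) = _
    have htake : (num.zip L).take (k + 1) =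
        (num.zip L).take k ++ [(num.getD k 0, L.getD k 0)] := by
      rw [List.take_add_one, zip_getD num L k hLlen (by omega)]
      rfl
    rw [htake, pfm_append]
    unfold dnInner
    simp only [PySem.List.pyGetD_natCast]
    have h1 : s.getD iN 0 = pfm (num.getD iN 0) ((num.zip L).take k) (a.getD iN 0) := by
      rw [hs]; exact getD_set_self a iN _ (by omega)
    have h2 : s.getD k 0 = L.getD k 0 := by
      rw [hs, getD_set_ne a iN k _ (by omega)]
      exact hpre k (by omega)
    by_cases hc : num.getD k 0 > num.getD iN 0
    · rw [if_pos hc, if_pos hc]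
      simp only [PySem.List.pySetD_natCast]
      rw [h1, h2, hs, List.set_set]
    · rw [if_neg hc, if_neg hc]

theorem down_loop (num : List Int) : ∀ m : Nat, 1 ≤ m → m ≤ num.length →
    (PySem.List.pyRange 1 (m : Int) 1).foldl (dnOuter num) (List.replicate num.length 0) =
      (lds num).take m ++ List.replicate (num.length - m) 0 := by
  intro m
  induction m with
  | zero => intro h; omega
  | succ m ih =>
    intro _ hm
    by_cases hm1 : m = 0
    · subst hm1
      rw [show ((1 : Nat) : Int) = 1 by norm_num, PySem.List.pyRange_one_eq_nil (by norm_num)]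
      simp only [List.foldl_nil]
      have hL0 : (lds num).getD 0 0 = 0 := by
        rw [lds_getD num 0 (by omega)]
        rfl
      have hLlen : (lds num).length = num.length := lds_length num
      have ht : (lds num).take 1 = [(lds num).getD 0 0] := by
        rw [getD_eq_getElem' _ _ (by omega)]
        rw [List.take_one]
        rw [List.head?_eq_getElem?, List.getElem?_eq_getElem (by omega)]
        rfl
      rw [ht, hL0]
      cases hnum : num.length with
      | zero => omega
      | succ t => simp [List.replicate_succ]
    · have hcast : ((m + 1 : Nat) : Int) = (m : Int) + 1 := by push_cast; ring
      rw [hcast, PySem.List.pyRange_one_succ_right (by exact_mod_cast Nat.one_le_iff_ne_zero.mpr hm1),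
        List.foldl_append, ih (by omega) (by omega)]
      set a := (lds num).take m ++ List.replicate (num.length - m) 0 with ha
      show dnOuter num a (m : Int) = _
      have hLlen : (lds num).length = num.length := lds_length num
      have halen : a.length = num.length := by
        rw [ha]; simp; omega
      have hpre : ∀ j : Nat, j < m → a.getD j 0 = (lds num).getD j 0 := by
        intro j hj
        rw [ha, List.getD_append _ _ _ _ (by simp; omega)]
        rw [getD_eq_getElem' _ _ (by simp; omega), getD_eq_getElem' _ _ (by omega)]
        exact List.getElem_take
      have ha0 : a.getD m 0 = 0 := by
        rw [ha]
        have hlt : (List.take m (lds num)).length = m := by simp; omega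
        rw [List.getD_append_right _ _ _ _ (by omega)]
        rw [hlt]
        simp only [Nat.sub_self]
        have : num.length - m ≠ 0 := by omega
        cases hh : num.length - m with
        | zero => omega
        | succ t => simp [List.replicate_succ]
      have := dnInner_fold num (lds num) a m (by omega) halen hLlen hpre m (le_refl m)
      show (PySem.List.pyRange 0 (m : Int) 1).foldl (dnInner num (m : Int)) a = _
      rw [this, ha0]
      have hpfm : pfm (num.getD m 0) ((num.zip (lds num)).take m) 0 = (lds num).getD m 0 := by
        rw [pfm_eq _ _ _ (le_refl 0), lds_getD num m (by omega)]
        have := bmax_nonneg (cand (num.getD m 0) ((num.zip (lds num)).take m))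
        omega
      rw [hpfm]
      -- list surgery: (take m ++ 0 :: zeros).set m v = take (m+1) ++ zeros
      rw [ha]
      have hlt : (List.take m (lds num)).length = m := by simp; omega
      have hrep : List.replicate (num.length - m) (0 : Int) =
          0 :: List.replicate (num.length - (m + 1)) 0 := by
        have : num.length - m = (num.length - (m + 1)) + 1 := by omega
        rw [this, List.replicate_succ]
      rw [List.set_append]
      have hcond : ¬ (m < (List.take m (lds num)).length) := by rw [hlt]; omega
      rw [if_neg hcond, hlt, Nat.sub_self, hrep, List.set_cons_zero]
      have htk : (lds num).take (m + 1) =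
          (lds num).take m ++ [(lds num).getD m 0] := by
        rw [List.take_add_one, getD_eq_getElem' _ _ (by omega),
          List.getElem?_eq_getElem (by omega)]
        rfl
      rw [htk]
      simp

theorem down_eq (num : List Int) : downA num = lds num := by
  cases hn : num.length with
  | zero =>
    have : num = [] := List.length_eq_zero_iff.mp hn
    subst this
    rfl
  | succ t =>
    unfold downA
    rw [PySem.List.len_eq]
    have h1 := down_loop num num.length (by omega) (le_refl _)
    have hc : ((num.length : Int)).toNat = num.length := by omega
    rw [hc]
    rw [h1]
    simp [lds_length]

theorem upInner_fold (num U a : List Int) (iN : Nat) (hi : iN < num.length)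
    (hlen : a.length = num.length) (hUlen : U.length = num.length)
    (hpost : ∀ j : Nat, iN < j → j < num.length → a.getD j 0 = U.getD j 0) :
    ∀ k : Nat, k ≤ num.length - (iN + 1) →
      (PySem.List.pyRange ((iN : Int) + 1) ((iN : Int) + 1 + (k : Int)) 1).foldl
          (upInner num (iN : Int)) a =
        a.set iN (pfm (num.getD iN 0) (((num.zip U).drop (iN + 1)).take k) (a.getD iN 0)) := by
  intro k
  induction k with
  | zero =>
    intro _
    rw [show (iN : Int) + 1 + ((0 : Nat) : Int) = (iN : Int) + 1 by push_cast; ring,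
      PySem.List.pyRange_one_eq_nil (le_refl _)]
    simp only [List.foldl_nil, List.take_zero]
    show a = a.set iN (a.getD iN 0)
    rw [set_getD_self a iN (by omega)]
  | succ k ih =>
    intro hk1
    have hk : k ≤ num.length - (iN + 1) := by omega
    have hcast : (iN : Int) + 1 + ((k + 1 : Nat) : Int) = ((iN : Int) + 1 + (k : Int)) + 1 := by
      push_cast; ring
    rw [hcast, PySem.List.pyRange_one_succ_right (by omega), List.foldl_append,
      ih hk]
    set s := a.set iN (pfm (num.getD iN 0) (((num.zip U).drop (iN + 1)).take k) (a.getD iN 0))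
      with hs
    set jN : Nat := iN + 1 + k with hj
    have hjlt : jN < num.length := by omega
    have hjcast : (iN : Int) + 1 + (k : Int) = ((jN : Nat) : Int) := by
      rw [hj]; push_cast; ring
    rw [hjcast]
    show upInner num (iN : Int) s ((jN : Nat) : Int) = _
    have htake : ((num.zip U).drop (iN + 1)).take (k + 1) =
        ((num.zip U).drop (iN + 1)).take k ++ [(num.getD jN 0, U.getD jN 0)] := by
      rw [List.take_add_one, List.getElem?_drop, show iN + 1 + k = jN from rfl,
        zip_getD num U jN hUlen hjlt]
      rfl
    rw [htake, pfm_append]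
    unfold upInner
    simp only [PySem.List.pyGetD_natCast]
    have h1 : s.getD iN 0 = pfm (num.getD iN 0) (((num.zip U).drop (iN + 1)).take k)
        (a.getD iN 0) := by
      rw [hs]; exact getD_set_self a iN _ (by omega)
    have h2 : s.getD jN 0 = U.getD jN 0 := by
      rw [hs, getD_set_ne a iN jN _ (by omega)]
      exact hpost jN (by omega) hjlt
    by_cases hc : num.getD iN 0 < num.getD jN 0
    · rw [if_pos hc, if_pos (by exact hc)]
      simp only [PySem.List.pySetD_natCast]
      rw [h1, h2, hs, List.set_set]
    · rw [if_neg hc, if_neg (by exact hc)]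

theorem up_loop (num : List Int) : ∀ t : Nat, t ≤ num.length →
    (PySem.List.pyRange ((t : Int) - 1) (-1) (-1)).foldl (upOuter num)
        (List.replicate t 0 ++ ((lds num.reverse).reverse).drop t) =
      (lds num.reverse).reverse := by
  have hUlen : ((lds num.reverse).reverse).length = num.length := by
    simp [lds_length]
  intro t
  induction t with
  | zero =>
    intro _
    rw [PySem.List.pyRange_neg_one_eq_nil (by norm_num)]
    simp
  | succ t ih =>
    intro ht
    set U := (lds num.reverse).reverse with hU
    have hcast : ((t + 1 : Nat) : Int) - 1 = (t : Int) := by push_cast; ring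
    rw [hcast, PySem.List.pyRange_neg_one_cons (by omega), List.foldl_cons]
    set a := List.replicate (t + 1) (0 : Int) ++ U.drop (t + 1) with ha
    have halen : a.length = num.length := by
      rw [ha]; simp [hUlen]; omega
    have hstep : upOuter num a (t : Int) = List.replicate t 0 ++ U.drop t := by
      unfold upOuter
      rw [PySem.List.len_eq]
      have hnc : (num.length : Int) = (t : Int) + 1 + ((num.length - (t + 1) : Nat) : Int) := by
        omega
      rw [hnc]
      have hpost : ∀ j : Nat, t < j → j < num.length → a.getD j 0 = U.getD j 0 := by
        intro j h1 h2
        rw [ha, List.getD_append_right _ _ _ _ (by simp; omega)]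
        rw [List.length_replicate]
        rw [getD_eq_getElem' _ _ (by simp [hUlen]; omega), getD_eq_getElem' _ _ (by omega)]
        rw [List.getElem_drop]
        congr 1
        omega
      have := upInner_fold num U a t (by omega) halen hUlen hpost
        (num.length - (t + 1)) (le_refl _)
      rw [this]
      have ha0 : a.getD t 0 = 0 := by
        rw [ha, List.getD_append _ _ _ _ (by simp)]
        simp
      have hdlen : ((num.zip U).drop (t + 1)).length = num.length - (t + 1) := by
        simp [hUlen]
      have htk : ((num.zip U).drop (t + 1)).take (num.length - (t + 1)) =
          (num.zip U).drop (t + 1) := by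
        rw [List.take_of_length_le (by rw [hdlen])]
      rw [htk, ha0]
      have hpfm : pfm (num.getD t 0) ((num.zip U).drop (t + 1)) 0 = U.getD t 0 := by
        rw [pfm_eq _ _ _ (le_refl 0)]
        have h3 := up_getD num t (by omega)
        rw [← hU] at h3
        rw [h3]
        have := bmax_nonneg (cand (num.getD t 0) ((num.zip U).drop (t + 1)))
        omega
      rw [hpfm]
      rw [ha, List.replicate_succ', List.append_assoc, List.set_append]
      rw [if_neg (by simp)]
      simp only [List.length_replicate, Nat.sub_self]
      show List.replicate t (0 : Int) ++ ((0 : Int) :: U.drop (t + 1)).set 0 (U.getD t 0) = _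
      rw [List.set_cons_zero]
      congr 1
      rw [getD_eq_getElem' _ _ (by omega)]
      exact (List.drop_eq_getElem_cons (by omega)).symm
    rw [hstep]
    exact ih (by omega)

theorem up_eq (num : List Int) : upA num = (lds num.reverse).reverse := by
  cases hn : num.length with
  | zero =>
    have : num = [] := List.length_eq_zero_iff.mp hn
    subst this
    rfl
  | succ n =>
    unfold upA
    rw [PySem.List.len_eq]
    have h1 := up_loop num (num.length - 1) (by omega)
    have hc1 : ((num.length - 1 : Nat) : Int) - 1 = (num.length : Int) - 2 := by
      rw [hn]; push_cast; ring
    rw [hc1] at h1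
    have hc2 : ((num.length : Int)).toNat = num.length := by omega
    rw [hc2]
    have hU : ((lds num.reverse).reverse).length = num.length := by simp [lds_length]
    have hdrop : ((lds num.reverse).reverse).drop (num.length - 1) =
        [((lds num.reverse).reverse).getD (num.length - 1) 0] := by
      rw [getD_eq_getElem' _ _ (by omega)]
      rw [List.drop_eq_getElem_cons (by omega)]
      rw [List.drop_eq_nil_of_le (by omega)]
    have hval : ((lds num.reverse).reverse).getD (num.length - 1) 0 = 0 := by
      rw [up_getD num (num.length - 1) (by omega)]
      rw [show num.length - 1 + 1 = num.length by omega]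
      rw [List.drop_eq_nil_of_le (by simp [hU])]
      rfl
    have hinit : List.replicate (num.length - 1) (0 : Int) ++
        ((lds num.reverse).reverse).drop (num.length - 1) =
        List.replicate num.length 0 := by
      rw [hdrop, hval, ← List.replicate_succ']
      congr 1
      omega
    rw [← hinit]
    exact h1

-- Per-value running maximum (the dict's semantics) and the B-side recursion.
def pmStep (v : Int) : Option Int → (Int × Int) → Option Int :=
  fun o p => if p.1 = v then some (max (o.getD 0) p.2) else o

def pmax (v : Int) (l : List (Int × Int)) : Option Int := l.foldl (pmStep v) none

def recB (pref : List (Int × Int)) (ans : Int) : List (Int × Int × Int) → Int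
  | [] => ans
  | t :: ts =>
      recB (pref ++ [(t.1, t.2.1)])
        (if (pmax t.1 pref).isSome then
           max ans (2 * (1 + min ((pmax t.1 pref).getD 0) t.2.2))
         else ans) ts

theorem pm_isSome (v : Int) : ∀ (l : List (Int × Int)) (o : Option Int),
    (l.foldl (pmStep v) o).isSome = true ↔ o.isSome = true ∨ ∃ p ∈ l, p.1 = v := by
  intro l
  induction l with
  | nil => intro o; simp
  | cons p t ih =>
    intro o
    show (t.foldl (pmStep v) (pmStep v o p)).isSome = true ↔ _
    rw [ih]
    unfold pmStep
    by_cases hc : p.1 = v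
    · simp [hc]
    · simp only [if_neg hc]
      constructor
      · rintro (h | h)
        · exact Or.inl h
        · exact Or.inr (by obtain ⟨q, hq, he⟩ := h; exact ⟨q, by simp [hq], he⟩)
      · rintro (h | ⟨q, hq, he⟩)
        · exact Or.inl h
        · rcases List.mem_cons.mp hq with h1 | h1
          · exact absurd (h1 ▸ he) hc
          · exact Or.inr ⟨q, h1, he⟩

theorem pm_mono (v : Int) : ∀ (l : List (Int × Int)) (o : Option Int),
    o.getD 0 ≤ (l.foldl (pmStep v) o).getD 0 := by
  intro l
  induction l with
  | nil => intro o; simp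
  | cons p t ih =>
    intro o
    refine le_trans ?_ (ih (pmStep v o p))
    unfold pmStep
    by_cases hc : p.1 = v
    · simp [hc]
    · simp [hc]

theorem pm_ge (v : Int) : ∀ (l : List (Int × Int)) (o : Option Int),
    ∀ p ∈ l, p.1 = v → p.2 ≤ (l.foldl (pmStep v) o).getD 0 := by
  intro l
  induction l with
  | nil => intro o p hp; simp at hp
  | cons q t ih =>
    intro o p hp he
    rcases List.mem_cons.mp hp with h1 | h1
    · subst h1
      refine le_trans ?_ (pm_mono v t (pmStep v o p))
      unfold pmStep
      simp [he]
    · exact ih (pmStep v o q) p h1 he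

theorem pm_mem (v : Int) : ∀ (l : List (Int × Int)), (∀ p ∈ l, 0 ≤ p.2) →
    ∀ (o : Option Int) (M : Int), l.foldl (pmStep v) o = some M →
      (o.isSome = true ∧ o.getD 0 = M) ∨ ∃ p ∈ l, p.1 = v ∧ p.2 = M := by
  intro l
  induction l with
  | nil =>
    intro _ o M h
    simp at h
    left
    simp [h]
  | cons q t ih =>
    intro h0 o M h
    have hstep : t.foldl (pmStep v) (pmStep v o q) = some M := h
    have := ih (fun p hp => h0 p (by simp [hp])) (pmStep v o q) M hstep
    rcases this with ⟨hsome, hval⟩ | ⟨p, hp, he, hv⟩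
    · unfold pmStep at hsome hval
      by_cases hc : q.1 = v
      · rw [if_pos hc] at hval
        simp only [Option.getD_some] at hval
        rcases max_choice (o.getD 0) q.2 with hm | hm
        · rw [hm] at hval
          cases o with
          | some w => left; simp at hval ⊢; exact hval
          | none =>
            right
            refine ⟨q, by simp, hc, ?_⟩
            have hq0 := h0 q (by simp)
            simp at hval hm
            omega
        · right
          exact ⟨q, by simp, hc, by omega⟩
      · rw [if_neg hc] at hsome hval
        left
        exact ⟨hsome, hval⟩
    · right
      exact ⟨p, by simp [hp], he, hv⟩

theorem bfold_eq : ∀ (ts : List (Int × Int × Int)) (best : PySem.Dict Int Int) (ans : Int)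
    (pref : List (Int × Int)), (∀ v : Int, best.get? v = pmax v pref) →
    (ts.foldl bStep (best, ans)).2 = recB pref ans ts := by
  intro ts
  induction ts with
  | nil => intro best ans pref _; rfl
  | cons t ts ih =>
    intro best ans pref hinv
    show (ts.foldl bStep (bStep (best, ans) t)).2 = _
    have hcont : best.contains t.1 = (pmax t.1 pref).isSome := by
      rw [PySem.Dict.contains_eq_isSome_get?, hinv]
    have hgetD : best.getD t.1 0 = (pmax t.1 pref).getD 0 := by
      rw [PySem.Dict.getD_eq_get?_getD, hinv]
    have hb : bStep (best, ans) t =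
        (best.insert t.1 (max ((pmax t.1 pref).getD 0) t.2.1),
         if (pmax t.1 pref).isSome then
           max ans (2 * (1 + min ((pmax t.1 pref).getD 0) t.2.2))
         else ans) := by
      unfold bStep
      simp only [hcont, hgetD]
    rw [hb]
    refine ih _ _ _ ?_
    intro v
    rw [PySem.Dict.get?_insert]
    have hpm : pmax v (pref ++ [(t.1, t.2.1)]) =
        if t.1 = v then some (max ((pmax v pref).getD 0) t.2.1) else pmax v pref := by
      unfold pmax
      rw [List.foldl_append]
      rfl
    rw [hpm, hinv]
    by_cases hv : v = t.1
    · subst hv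
      simp
    · rw [if_neg hv, if_neg (fun hh => hv hh.symm)]

theorem recB_mono : ∀ (ts : List (Int × Int × Int)) (pref : List (Int × Int)) (ans : Int),
    ans ≤ recB pref ans ts := by
  intro ts
  induction ts with
  | nil => intro pref ans; exact le_refl ans
  | cons t ts ih =>
    intro pref ans
    refine le_trans ?_ (ih (pref ++ [(t.1, t.2.1)]) _)
    by_cases hc : (pmax t.1 pref).isSome = true
    · simp [hc]
    · simp [hc]

theorem recB_ub : ∀ (ts : List (Int × Int × Int)) (pref : List (Int × Int)) (ans : Int),
    recB pref ans ts = ans ∨ ∃ ts₁ t ts₂, ts = ts₁ ++ t :: ts₂ ∧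
      (pmax t.1 (pref ++ ts₁.map (fun q => (q.1, q.2.1)))).isSome = true ∧
      recB pref ans ts =
        2 * (1 + min ((pmax t.1 (pref ++ ts₁.map (fun q => (q.1, q.2.1)))).getD 0) t.2.2) := by
  intro ts
  induction ts with
  | nil => intro pref ans; exact Or.inl rfl
  | cons t ts ih =>
    intro pref ans
    rcases ih (pref ++ [(t.1, t.2.1)])
        (if (pmax t.1 pref).isSome then
           max ans (2 * (1 + min ((pmax t.1 pref).getD 0) t.2.2))
         else ans) with h | ⟨ts₁, t', ts₂, hsplit, hsome, hval⟩
    · have hrec : recB pref ans (t :: ts) =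
          recB (pref ++ [(t.1, t.2.1)])
            (if (pmax t.1 pref).isSome then
               max ans (2 * (1 + min ((pmax t.1 pref).getD 0) t.2.2))
             else ans) ts := rfl
      by_cases hc : (pmax t.1 pref).isSome = true
      · rw [if_pos hc] at h
        rcases max_choice ans (2 * (1 + min ((pmax t.1 pref).getD 0) t.2.2)) with hm | hm
        · left
          rw [hrec, if_pos hc, h, hm]
        · right
          refine ⟨[], t, ts, rfl, by simpa using hc, ?_⟩
          rw [hrec, if_pos hc, h, hm]
          simp
      · rw [if_neg hc] at h
        left
        rw [hrec, if_neg hc, h]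
    · right
      refine ⟨t :: ts₁, t', ts₂, by rw [hsplit]; simp, ?_, ?_⟩
      · rw [show (t :: ts₁).map (fun q => (q.1, q.2.1)) =
          (t.1, t.2.1) :: ts₁.map (fun q => (q.1, q.2.1)) from rfl] at *
        rw [show pref ++ (t.1, t.2.1) :: ts₁.map (fun q => (q.1, q.2.1)) =
          (pref ++ [(t.1, t.2.1)]) ++ ts₁.map (fun q => (q.1, q.2.1)) by simp]
        exact hsome
      · show recB (pref ++ [(t.1, t.2.1)]) _ _ = _
        rw [hval]
        congr 2
        simp
    
theorem recB_attain : ∀ (ts₁ : List (Int × Int × Int)) (t : Int × Int × Int)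
    (ts₂ : List (Int × Int × Int)) (pref : List (Int × Int)) (ans : Int),
    (pmax t.1 (pref ++ ts₁.map (fun q => (q.1, q.2.1)))).isSome = true →
    2 * (1 + min ((pmax t.1 (pref ++ ts₁.map (fun q => (q.1, q.2.1)))).getD 0) t.2.2) ≤
      recB pref ans (ts₁ ++ t :: ts₂) := by
  intro ts₁
  induction ts₁ with
  | nil =>
    intro t ts₂ pref ans hsome
    simp only [List.map_nil, List.append_nil] at hsome ⊢
    show _ ≤ recB (pref ++ [(t.1, t.2.1)]) _ ts₂
    refine le_trans ?_ (recB_mono ts₂ _ _)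
    rw [if_pos hsome]
    exact le_max_right _ _
  | cons q ts₁ ih =>
    intro t ts₂ pref ans hsome
    show _ ≤ recB (pref ++ [(q.1, q.2.1)]) _ (ts₁ ++ t :: ts₂)
    have h2 : pref ++ (q :: ts₁).map (fun q => (q.1, q.2.1)) =
        (pref ++ [(q.1, q.2.1)]) ++ ts₁.map (fun q => (q.1, q.2.1)) := by simp
    rw [h2] at hsome ⊢
    exact ih t ts₂ _ _ hsome

-- A-side final loop: value of a matched pair, inner and outer fold functions.
def vval (L U : List Int) (i j : Int) : Int :=
  2 * (1 + min (PySem.List.pyGetD L i 0) (PySem.List.pyGetD U j 0))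

def iF (num L U : List Int) (i : Int) : Int → Int → Int := fun ans j =>
  if PySem.List.pyGetD num j 0 == PySem.List.pyGetD num i 0 then
    max ans (vval L U i j)
  else ans

def oF (num L U : List Int) : Int → Int → Int := fun ans i =>
  (PySem.List.pyRange (i + 1) (PySem.List.len num) 1).foldl (iF num L U i) ans

theorem ansA_eq (num L U : List Int) :
    ansA num L U = (PySem.List.pyRange 0 (PySem.List.len num) 1).foldl (oF num L U) 0 := by
  unfold ansA
  rw [PySem.List.enumerate_eq_map_pyRange (d := 0), List.foldl_map]
  rfl

theorem innerA_mono (num L U : List Int) (i : Int) :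
    ∀ (l : List Int) (ans : Int), ans ≤ l.foldl (iF num L U i) ans := by
  intro l
  induction l with
  | nil => intro ans; exact le_refl ans
  | cons j t ih =>
    intro ans
    refine le_trans ?_ (ih (iF num L U i ans j))
    unfold iF
    by_cases hc : (PySem.List.pyGetD num j 0 == PySem.List.pyGetD num i 0) = true
    · simp [hc]
    · simp [hc]

theorem innerA_attain (num L U : List Int) (i : Int) :
    ∀ (l : List Int) (ans j : Int), j ∈ l →
      (PySem.List.pyGetD num j 0 == PySem.List.pyGetD num i 0) = true →
      vval L U i j ≤ l.foldl (iF num L U i) ans := by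
  intro l
  induction l with
  | nil => intro ans j hj; simp at hj
  | cons a t ih =>
    intro ans j hj hc
    rcases List.mem_cons.mp hj with h1 | h1
    · subst h1
      refine le_trans ?_ (innerA_mono num L U i t (iF num L U i ans j))
      unfold iF
      rw [hc]
      simp
    · exact ih (iF num L U i ans a) j h1 hc

theorem innerA_ub (num L U : List Int) (i : Int) :
    ∀ (l : List Int) (ans : Int), l.foldl (iF num L U i) ans = ans ∨
      ∃ j ∈ l, (PySem.List.pyGetD num j 0 == PySem.List.pyGetD num i 0) = true ∧
        l.foldl (iF num L U i) ans = vval L U i j := by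
  intro l
  induction l with
  | nil => intro ans; exact Or.inl rfl
  | cons a t ih =>
    intro ans
    rcases ih (iF num L U i ans a) with h | ⟨j, hj, hc, hv⟩
    · have hstep : (a :: t).foldl (iF num L U i) ans = iF num L U i ans a := h
      by_cases hc : (PySem.List.pyGetD num a 0 == PySem.List.pyGetD num i 0) = true
      · have hif : iF num L U i ans a = max ans (vval L U i a) := by
          unfold iF
          rw [hc]
          simp
        rcases max_choice ans (vval L U i a) with hm | hm
        · left
          rw [hstep, hif, hm]
        · right
          exact ⟨a, by simp, hc, by rw [hstep, hif, hm]⟩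
      · left
        have hif : iF num L U i ans a = ans := by
          unfold iF
          rw [if_neg (by simpa using hc)]
        rw [hstep, hif]
    · right
      exact ⟨j, by simp [hj], hc, hv⟩

theorem outerA_mono (num L U : List Int) :
    ∀ (l : List Int) (ans : Int), ans ≤ l.foldl (oF num L U) ans := by
  intro l
  induction l with
  | nil => intro ans; exact le_refl ans
  | cons i t ih =>
    intro ans
    exact le_trans (innerA_mono num L U i _ ans) (ih (oF num L U ans i))

theorem outerA_attain (num L U : List Int) :
    ∀ (l : List Int) (ans i j : Int), i ∈ l →
      j ∈ PySem.List.pyRange (i + 1) (PySem.List.len num) 1 →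
      (PySem.List.pyGetD num j 0 == PySem.List.pyGetD num i 0) = true →
      vval L U i j ≤ l.foldl (oF num L U) ans := by
  intro l ans i j hi hj hc
  obtain ⟨l₁, l₂, rfl⟩ := List.append_of_mem hi
  rw [List.foldl_append, List.foldl_cons]
  refine le_trans ?_ (outerA_mono num L U l₂ _)
  exact innerA_attain num L U i _ _ j hj hc

theorem outerA_ub (num L U : List Int) :
    ∀ (l : List Int) (ans : Int), l.foldl (oF num L U) ans = ans ∨
      ∃ i ∈ l, ∃ j ∈ PySem.List.pyRange (i + 1) (PySem.List.len num) 1,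
        (PySem.List.pyGetD num j 0 == PySem.List.pyGetD num i 0) = true ∧
        l.foldl (oF num L U) ans = vval L U i j := by
  intro l
  induction l with
  | nil => intro ans; exact Or.inl rfl
  | cons a t ih =>
    intro ans
    rcases ih (oF num L U ans a) with h | ⟨i, hi, j, hj, hc, hv⟩
    · rw [List.foldl_cons, h]
      rcases innerA_ub num L U a _ ans with h2 | ⟨j, hj, hc, hv⟩
      · exact Or.inl h2
      · right
        exact ⟨a, by simp, j, hj, hc, hv⟩
    · right
      exact ⟨i, by simp [hi], j, hj, hc, by rw [List.foldl_cons, hv]⟩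

-- Bridge: the first two components of the B-side triples are the pairs (num[i], down[i]).
theorem zmap_fst2 : ∀ (num L U : List Int), L.length = U.length →
    (num.zip (L.zip U)).map (fun q => (q.1, q.2.1)) = num.zip L := by
  intro num
  induction num with
  | nil => intro L U h; simp
  | cons x t ih =>
    intro L U h
    cases L with
    | nil => simp
    | cons a L' =>
      cases U with
      | nil => simp at h
      | cons b U' =>
        simp only [List.zip_cons_cons, List.map_cons]
        rw [ih L' U' (by simpa using h)]

theorem main_eq (num : List Int) : valley num = valley_alt num := by
  have hL : (lds num).length = num.length := lds_length num
  have hU : ((lds num.reverse).reverse).length = num.length := by simp [lds_length]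
  set L := lds num with hLdef
  set U := (lds num.reverse).reverse with hUdef
  set z := num.zip (L.zip U) with hz
  have hzlen : z.length = num.length := by
    rw [hz]
    simp [hL, hU]
  have hA : valley num = ansA num L U := by
    rw [valley_eq, down_eq, up_eq]
  have hB : valley_alt num = recB [] 0 z := by
    rw [valley_alt_eq, upB_eq]
    exact bfold_eq _ PySem.Dict.empty 0 [] (fun v => by
      rw [PySem.Dict.get?_empty]; rfl)
  rw [hA, hB, ansA_eq]
  have hmapz : ∀ k : Nat, (z.take k).map (fun q => (q.1, q.2.1)) = (num.zip L).take k := by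
    intro k
    rw [List.map_take, zmap_fst2 num L U (by rw [hL, hU])]
  have hzj : ∀ jN : Nat, ∀ h : jN < num.length,
      z[jN]'(by rw [hzlen]; omega) = (num.getD jN 0, L.getD jN 0, U.getD jN 0) := by
    intro jN h
    rw [getD_eq_getElem' _ _ h, getD_eq_getElem' _ _ (by omega),
      getD_eq_getElem' _ _ (by omega)]
    show (num.zip (L.zip U))[jN]'(by simp [hL, hU]; omega) = _
    rw [List.getElem_zip, List.getElem_zip]
  have hnn : ∀ (k : Nat), ∀ p ∈ (num.zip L).take k, (0 : Int) ≤ p.2 := by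
    intro k p hp
    exact lds_nonneg num p.2 (List.of_mem_zip (List.mem_of_mem_take hp)).2
  apply le_antisymm
  · -- A ≤ B
    rcases outerA_ub num L U (PySem.List.pyRange 0 (PySem.List.len num) 1) 0 with
      h0 | ⟨i, hi, j, hj, hcond, hval⟩
    · rw [h0]
      exact recB_mono z [] 0
    · rw [hval]
      rw [PySem.List.len_eq] at hi hj
      have hi' := (PySem.List.mem_pyRange_one).mp hi
      have hj' := (PySem.List.mem_pyRange_one).mp hj
      set iN := i.toNat with hiN
      set jN := j.toNat with hjN
      have hiC : i = (iN : Int) := by omega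
      have hjC : j = (jN : Int) := by omega
      have hiNlt : iN < jN := by omega
      have hjNlt : jN < num.length := by omega
      have hiNn : iN < num.length := by omega
      rw [hiC, hjC] at hcond
      simp only [PySem.List.pyGetD_natCast, beq_iff_eq] at hcond
      have hpmem : (num.getD jN 0, L.getD iN 0) ∈ (num.zip L).take jN := by
        refine List.mem_take_iff_getElem.mpr ⟨iN, by simp [hL]; omega, ?_⟩
        rw [List.getElem_zip, hcond, getD_eq_getElem' _ _ hiNn,
          getD_eq_getElem' _ _ (by rw [hL]; omega)]
      have hsome : (pmax (num.getD jN 0) ((num.zip L).take jN)).isSome = true :=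
        (pm_isSome _ _ none).mpr (Or.inr ⟨_, hpmem, rfl⟩)
      have hM : L.getD iN 0 ≤ (pmax (num.getD jN 0) ((num.zip L).take jN)).getD 0 :=
        pm_ge (num.getD jN 0) ((num.zip L).take jN) none _ hpmem rfl
      have hsplit : z = z.take jN ++ z[jN]'(by rw [hzlen]; omega) :: z.drop (jN + 1) := by
        conv_lhs => rw [← List.take_append_drop jN z]
        rw [List.drop_eq_getElem_cons (by rw [hzlen]; omega)]
      rw [hzj jN hjNlt] at hsplit
      have hatt := recB_attain (z.take jN) (num.getD jN 0, L.getD jN 0, U.getD jN 0)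
        (z.drop (jN + 1)) [] 0
      rw [List.nil_append, hmapz jN] at hatt
      have hatt2 := hatt hsome
      have hfin : vval L U i j ≤ 2 * (1 + min
          ((pmax (num.getD jN 0) ((num.zip L).take jN)).getD 0) (U.getD jN 0)) := by
        rw [hiC, hjC]
        unfold vval
        simp only [PySem.List.pyGetD_natCast]
        omega
      refine le_trans hfin (le_trans hatt2 ?_)
      rw [← hsplit]
  · -- B ≤ A
    rcases recB_ub z [] 0 with h0 | ⟨ts₁, t, ts₂, hsplit, hsome, hval⟩
    · rw [h0]
      exact outerA_mono num L U _ 0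
    · set jN := ts₁.length with hjN
      have hjNlt : jN < num.length := by
        have := congrArg List.length hsplit
        rw [hzlen] at this
        simp at this
        omega
      have hts1 : ts₁ = z.take jN := by
        rw [hsplit, hjN, List.take_left]
      have ht : t = (num.getD jN 0, L.getD jN 0, U.getD jN 0) := by
        have h1 : z[jN]'(by rw [hzlen]; omega) = t := by
          calc z[jN]'(by rw [hzlen]; omega)
              = (ts₁ ++ t :: ts₂)[jN]'(by
                  have := congrArg List.length hsplit
                  rw [hzlen] at this
                  omega) := List.getElem_of_eq hsplit _
            _ = t := by
                rw [List.getElem_append_right (by omega)]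
                simp [hjN]
        rw [← h1, hzj jN hjNlt]
      rw [List.nil_append, hts1, hmapz jN, ht] at hsome hval
      obtain ⟨M, hMeq⟩ := Option.isSome_iff_exists.mp hsome
      rcases pm_mem _ _ (hnn jN) none M hMeq with ⟨hns, _⟩ | ⟨p, hp, hpv, hpM⟩
      · simp at hns
      · obtain ⟨iN, hiNb, hgetp⟩ := List.mem_take_iff_getElem.mp hp
        have hiNlt : iN < jN := by
          have : iN < min jN (num.zip L).length := hiNb
          omega
        have hiNn : iN < num.length := by omega
        rw [List.getElem_zip] at hgetp
        have hp1 : p.1 = num.getD iN 0 := by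
          rw [getD_eq_getElem' _ _ hiNn, ← hgetp]
        have hp2 : p.2 = L.getD iN 0 := by
          rw [getD_eq_getElem' _ _ (by rw [hL]; omega), ← hgetp]
        rw [hval]
        have hcond : (PySem.List.pyGetD num ((jN : Nat) : Int) 0 ==
            PySem.List.pyGetD num (((iN : Nat) : Int)) 0) = true := by
          simp only [PySem.List.pyGetD_natCast, beq_iff_eq]
          rw [← hp1, hpv]
        have hatt := outerA_attain num L U (PySem.List.pyRange 0 (PySem.List.len num) 1) 0
          ((iN : Nat) : Int) ((jN : Nat) : Int)
          (by
            rw [PySem.List.len_eq]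
            refine (PySem.List.mem_pyRange_one).mpr ⟨by omega, by exact_mod_cast hiNn⟩)
          (by
            rw [PySem.List.len_eq]
            refine (PySem.List.mem_pyRange_one).mpr ⟨by omega, by exact_mod_cast hjNlt⟩)
          hcond
        refine le_trans ?_ hatt
        unfold vval
        simp only [PySem.List.pyGetD_natCast]
        rw [hMeq]
        simp only [Option.getD_some]
        rw [← hpM, hp2]
-- ===== VERDICT (by name: the statement is the Claim_ definition above) =====
theorem valley_spec : Claim_equal_valley := by
  intro num _
  exact main_eq num
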